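-- pv_equiv track=rewrite | github.com/LisaVial/Spielwiese | 0_Albina_burst_analysis.py | get_mcs_index
-- ===== SOURCE A (Python) =====
-- def get_mcs_index(sc_index: int, dead_channels: list):
--
--     # special case: sc index is 0 and mcs index 0 is not a dead channel
--     if 0 not in dead_channels and sc_index == 0:
--         return 0
--
--     current_sc_index = 0
--     for row_index in range(252):
--         if row_index not in dead_channels:
--             current_sc_index += 1
--             if current_sc_index == sc_index:
--                 return row_index
--
--     raise Exception("SC index not in valid range (0, " + str(251 - len(dead_channels)) + ")")
-- ===== SOURCE B (Python) =====
-- def get_mcs_index(sc_index: int, dead_channels: list):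
--     # special case: sc index is 0 and mcs index 0 is not a dead channel
--     if 0 not in dead_channels and sc_index == 0:
--         return 0
--     # jump arithmetic: start at sc_index-1 and shift past each dead row,
--     # processing only the (distinct, in-range) dead channels in ascending order
--     row = sc_index - 1
--     for d in sorted(set(x for x in dead_channels if 0 <= x < 252)):
--         if d <= row:
--             row += 1
--     if 1 <= sc_index and row <= 251:
--         return row
--     raise Exception("SC index not in valid range (0, " + str(251 - len(dead_channels)) + ")")
-- ===== Notes on version B (the rewrite author's own statement) =====
-- stated objective: alternative
-- what changed: Instead of scanning all 252 rows with a running counter, B iterates only over the sorted distinct in-range dead channels, shifting the target row past each dead row (jump arithmetic), so no per-row scan happens at all.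
import Mathlib
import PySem

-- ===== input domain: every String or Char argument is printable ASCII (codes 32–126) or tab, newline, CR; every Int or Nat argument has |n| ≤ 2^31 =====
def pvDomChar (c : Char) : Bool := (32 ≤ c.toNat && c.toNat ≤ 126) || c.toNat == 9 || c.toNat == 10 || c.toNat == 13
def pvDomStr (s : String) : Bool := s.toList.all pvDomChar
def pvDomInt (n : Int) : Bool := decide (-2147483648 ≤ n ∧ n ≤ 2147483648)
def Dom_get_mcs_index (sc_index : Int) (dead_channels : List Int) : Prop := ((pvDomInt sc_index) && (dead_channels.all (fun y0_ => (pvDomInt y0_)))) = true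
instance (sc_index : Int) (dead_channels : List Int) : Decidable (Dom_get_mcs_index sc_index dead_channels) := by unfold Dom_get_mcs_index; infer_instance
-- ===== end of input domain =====

-- B replaces A's scan over all 252 rows (running counter, early return) by jump
-- arithmetic over the sorted distinct in-range dead channels only (objective: alternative).

-- ===== PORT A =====
-- the for-loop over range(252) with the running counter current_sc_index;
-- the unreachable-on-Pre_ raise path returns 0
def pvLoopA (sc : Int) (dead : List Int) : Int → List Int → Int
  | _, [] => 0
  | cur, r :: rs =>
    if !dead.contains r then
      (if cur + 1 = sc then r else pvLoopA sc dead (cur + 1) rs)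
    else pvLoopA sc dead cur rs

def get_mcs_index (sc_index : Int) (dead_channels : List Int) : Int :=
  if dead_channels.contains 0 = false ∧ sc_index = 0 then 0
  else pvLoopA sc_index dead_channels 0 (PySem.List.pyRange 0 252 1)

-- ===== PORT B =====
def get_mcs_index_alt (sc_index : Int) (dead_channels : List Int) : Int :=
  if dead_channels.contains 0 = false ∧ sc_index = 0 then 0
  else
    let ds := PySem.List.sorted
      (PySem.Set.ofList (dead_channels.filter (fun x => decide (0 ≤ x) && decide (x < 252))))
      (fun x => x) false
    let row := ds.foldl (fun r d => if d ≤ r then r + 1 else r) (sc_index - 1)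
    if 1 ≤ sc_index ∧ row ≤ 251 then row else 0  -- raise path, excluded by Pre_

-- ===== PRECONDITION & SPEC =====
-- Pre_ admits exactly the inputs on which A returns (elsewhere A raises Exception).
def Pre_get_mcs_index (sc_index : Int) (dead_channels : List Int) : Prop :=
  (dead_channels.contains 0 = false ∧ sc_index = 0) ∨
  (1 ≤ sc_index ∧
    sc_index ≤ ((PySem.List.pyRange 0 252 1).filter
      (fun r => !dead_channels.contains r)).length)

instance (sc_index : Int) (dead_channels : List Int) : Decidable (Pre_get_mcs_index sc_index dead_channels) := by unfold Pre_get_mcs_index; infer_instance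

def pvWitness_get_mcs_index : Int × List Int := (0, [1])

def Spec_get_mcs_index (sc_index : Int) (dead_channels : List Int) (out : Int) : Prop := out = get_mcs_index_alt sc_index dead_channels
instance (sc_index : Int) (dead_channels : List Int) (out : Int) : Decidable (Spec_get_mcs_index sc_index dead_channels out) := by unfold Spec_get_mcs_index; infer_instance

-- ===== CLAIM (what is proved, stated in full; the proofs are below) =====
def Claim_equal_get_mcs_index : Prop := ∀ (sc_index : Int) (dead_channels : List Int), Dom_get_mcs_index sc_index dead_channels → Pre_get_mcs_index sc_index dead_channels → Spec_get_mcs_index sc_index dead_channels (get_mcs_index sc_index dead_channels)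

-- ===== LEMMAS AND PROOFS =====

-- A's scan returns the (sc - cur)-th (1-based) element of the valid rows ahead of it.
theorem pvLoopA_eq (sc : Int) (dead : List Int) :
    ∀ (rows : List Int) (cur : Int), 1 ≤ sc - cur →
      sc - cur ≤ (rows.filter (fun r => !dead.contains r)).length →
      pvLoopA sc dead cur rows =
        (rows.filter (fun r => !dead.contains r)).getD (sc - cur - 1).toNat 0 := by
  intro rows
  induction rows with
  | nil =>
    intro cur h1 h2
    simp at h2
    omega
  | cons r rs ih =>
    intro cur h1 h2
    by_cases hr : (!dead.contains r) = true
    · rw [List.filter_cons, if_pos hr] at h2 ⊢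
      simp only [pvLoopA, hr, if_true]
      by_cases hc : cur + 1 = sc
      · have h0 : (sc - cur - 1).toNat = 0 := by omega
        rw [if_pos hc, h0, List.getD_cons_zero]
      · have h1' : 1 ≤ sc - (cur + 1) := by omega
        have h2' : sc - (cur + 1) ≤ ((rs.filter (fun r => !dead.contains r)).length : Int) := by
          rw [List.length_cons] at h2; push_cast at h2 ⊢; omega
        rw [if_neg hc, ih (cur + 1) h1' h2']
        have hgt : (sc - cur - 1).toNat = (sc - (cur + 1) - 1).toNat + 1 := by omega
        rw [hgt, List.getD_cons_succ]
    · rw [List.filter_cons, if_neg hr] at h2 ⊢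
      simp only [pvLoopA, hr, Bool.false_eq_true, if_false]
      exact ih cur h1 h2

-- the shift loop is the identity when every dead channel lies above the row
theorem pvShift_id (ds : List Int) (k : Int) (h : ∀ d ∈ ds, k < d) :
    ds.foldl (fun r d => if d ≤ r then r + 1 else r) k = k := by
  induction ds with
  | nil => rfl
  | cons d rest ih =>
    have hd : ¬ d ≤ k := by have := h d (by simp); omega
    simp only [List.foldl_cons, if_neg hd]
    exact ih (fun e he => h e (by simp [he]))

-- B's shift loop lands on the (k-a)-th valid row of range(a, n)
theorem pvShift_eq : ∀ (ds : List Int) (a n k : Int), ds.Pairwise (· < ·) →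
    (∀ d ∈ ds, a ≤ d ∧ d < n) → a ≤ k → k + ds.length < n →
    ds.foldl (fun r d => if d ≤ r then r + 1 else r) k =
      ((PySem.List.pyRange a n 1).filter (fun r => !ds.contains r)).getD (k - a).toNat 0 := by
  intro ds
  induction ds with
  | nil =>
    intro a n k _ _ hak hkn
    simp only [List.length_nil, Int.natCast_zero, add_zero] at hkn
    have hfe : (PySem.List.pyRange a n 1).filter (fun r => !([] : List Int).contains r)
        = PySem.List.pyRange a n 1 := List.filter_eq_self.2 (by intro x hx; simp)
    rw [List.foldl_nil, hfe]
    have hlen : (k - a).toNat < (PySem.List.pyRange a n 1).length := by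
      rw [PySem.List.length_pyRange_one]; omega
    rw [List.getD_eq_getElem _ _ hlen, PySem.List.getElem_pyRange_one]
    omega
  | cons d rest ih =>
    intro a n k hpw hbnd hak hkn
    obtain ⟨had, hdn⟩ := hbnd d (by simp)
    rw [List.pairwise_cons] at hpw
    obtain ⟨hgt, hpwr⟩ := hpw
    have hbr : ∀ e ∈ rest, d + 1 ≤ e ∧ e < n := fun e he =>
      ⟨by have := hgt e he; omega, (hbnd e (by simp [he])).2⟩
    have hlc : rest.length + 1 = (d :: rest).length := by simp
    by_cases hdk : d ≤ k
    · -- shift past d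
      simp only [List.foldl_cons, if_pos hdk]
      have hihres := ih (d + 1) n (k + 1) hpwr hbr (by omega)
        (by simp only [List.length_cons] at hkn; push_cast at hkn ⊢; omega)
      rw [hihres]
      -- rewrite the RHS range split
      rw [PySem.List.pyRange_one_append a (d+1) n (by omega) (by omega), List.filter_append]
      rw [PySem.List.pyRange_one_succ_right (a := a) (b := d) (by omega), List.filter_append]
      have hf1 : (PySem.List.pyRange a d 1).filter (fun r => !(d :: rest).contains r)
          = PySem.List.pyRange a d 1 := by
        apply List.filter_eq_self.2
        intro x hx
        rw [PySem.List.mem_pyRange_one] at hx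
        simp only [List.contains_cons, Bool.not_eq_eq_eq_not, Bool.not_true, Bool.or_eq_false_iff]
        constructor
        · simp only [beq_eq_false_iff_ne]; omega
        · by_contra hc
          simp only [Bool.not_eq_false, List.contains_eq_mem, decide_eq_true_eq] at hc
          have := hgt x hc; omega
      have hf2 : ([d] : List Int).filter (fun r => !(d :: rest).contains r) = [] := by
        simp
      have hf3 : (PySem.List.pyRange (d+1) n 1).filter (fun r => !(d :: rest).contains r)
          = (PySem.List.pyRange (d+1) n 1).filter (fun r => !rest.contains r) := by
        apply List.filter_congr
        intro x hx
        rw [PySem.List.mem_pyRange_one] at hx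
        simp only [List.contains_cons]
        have : (x == d) = false := by simp only [beq_eq_false_iff_ne]; omega
        rw [this, Bool.false_or]
      rw [hf1, hf2, hf3, List.append_nil]
      rw [List.getD_append_right _ _ _ _ (by rw [PySem.List.length_pyRange_one]; omega)]
      congr 1
      rw [PySem.List.length_pyRange_one]
      omega
    · -- k < d: no shift at all
      simp only [List.foldl_cons, if_neg hdk]
      rw [pvShift_id rest k (fun e he => by have := hgt e he; omega)]
      rw [PySem.List.pyRange_one_append a d n (by omega) (by omega), List.filter_append]
      have hf1 : (PySem.List.pyRange a d 1).filter (fun r => !(d :: rest).contains r)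
          = PySem.List.pyRange a d 1 := by
        apply List.filter_eq_self.2
        intro x hx
        rw [PySem.List.mem_pyRange_one] at hx
        simp only [List.contains_cons, Bool.not_eq_eq_eq_not, Bool.not_true, Bool.or_eq_false_iff]
        constructor
        · simp only [beq_eq_false_iff_ne]; omega
        · by_contra hc
          simp only [Bool.not_eq_false, List.contains_eq_mem, decide_eq_true_eq] at hc
          have := hgt x hc; omega
      rw [hf1]
      have hlt : (k - a).toNat < (PySem.List.pyRange a d 1).length := by
        rw [PySem.List.length_pyRange_one]; omega
      rw [List.getD_append _ _ _ _ hlt, List.getD_eq_getElem _ _ hlt,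
        PySem.List.getElem_pyRange_one]
      omega

-- ===== VERDICT (by name: the statement is the Claim_ definition above) =====
theorem get_mcs_index_spec : Claim_equal_get_mcs_index := by
  intro sc dead _ hpre
  unfold Spec_get_mcs_index get_mcs_index get_mcs_index_alt
  by_cases hs : dead.contains 0 = false ∧ sc = 0
  · rw [if_pos hs, if_pos hs]
  · rcases hpre with h | ⟨h1, h2⟩
    · exact absurd h hs
    · rw [if_neg hs, if_neg hs]
      simp only []
      set ds := PySem.List.sorted
        (PySem.Set.ofList (dead.filter (fun x => decide (0 ≤ x) && decide (x < 252))))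
        (fun x => x) false with hds
      set valid := (PySem.List.pyRange 0 252 1).filter (fun r => !dead.contains r) with hvalid
      have hpw : ds.Pairwise (· < ·) := PySem.List.sorted_ofList_pairwise_lt _
      have hmem : ∀ x : Int, x ∈ ds ↔ x ∈ dead ∧ 0 ≤ x ∧ x < 252 := by
        intro x
        rw [hds, PySem.List.mem_sorted, PySem.Set.mem_ofList, List.mem_filter]
        simp
      have hbnd : ∀ d ∈ ds, (0:Int) ≤ d ∧ d < 252 := fun d hd => ((hmem d).1 hd).2
      -- the valid rows are the same whether we exclude dead or ds
      have hfeq : (PySem.List.pyRange 0 252 1).filter (fun r => !ds.contains r) = valid := by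
        rw [hvalid]
        apply List.filter_congr
        intro x hx
        rw [PySem.List.mem_pyRange_one] at hx
        have : ds.contains x = dead.contains x := by
          simp only [List.contains_eq_mem, decide_eq_decide, hmem x]
          constructor
          · exact fun ⟨hxd, _⟩ => hxd
          · exact fun hxd => ⟨hxd, hx.1, hx.2⟩
        rw [this]
      -- ds has as many elements as the in-range dead rows
      have hperm : ds.Perm ((PySem.List.pyRange 0 252 1).filter (fun r => dead.contains r)) := by
        have hnd : ds.Nodup := ((PySem.List.sorted_perm _ _ _).nodup_iff).2
          (PySem.Set.nodup_ofList _)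
        have hnd2 : ((PySem.List.pyRange 0 252 1).filter (fun r => dead.contains r)).Nodup :=
          (PySem.List.nodup_pyRange_one 0 252).filter _
        rw [List.perm_ext_iff_of_nodup hnd hnd2]
        intro x
        rw [hmem, List.mem_filter, PySem.List.mem_pyRange_one]
        simp only [List.contains_eq_mem, decide_eq_true_eq]
        constructor
        · exact fun ⟨hxd, hl, hu⟩ => ⟨⟨hl, hu⟩, hxd⟩
        · exact fun ⟨⟨hl, hu⟩, hxd⟩ => ⟨hxd, hl, hu⟩
      have hlensum : valid.length + ds.length = 252 := by
        have := List.length_eq_length_filter_add (l := PySem.List.pyRange 0 252 1)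
          (fun r => dead.contains r)
        rw [hperm.length_eq]
        rw [PySem.List.length_pyRange_one] at this
        simp only [hvalid]
        omega
      have h2' : sc ≤ (valid.length : Int) := by exact_mod_cast h2
      have hshift := pvShift_eq ds 0 252 (sc - 1) hpw hbnd (by omega)
        (by have : (ds.length : Int) = 252 - valid.length := by omega
            omega)
      rw [hfeq, sub_zero] at hshift
      rw [hshift]
      have hidx : (sc - 1).toNat < valid.length := by omega
      have hrow_mem : valid.getD (sc - 1).toNat 0 ∈ valid := by
        rw [List.getD_eq_getElem _ _ hidx]
        exact List.getElem_mem hidx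
      have hrow_le : valid.getD (sc - 1).toNat 0 ≤ 251 := by
        have := List.of_mem_filter hrow_mem
        have hm := List.mem_of_mem_filter hrow_mem
        rw [PySem.List.mem_pyRange_one] at hm
        omega
      rw [if_pos ⟨h1, hrow_le⟩]
      rw [pvLoopA_eq sc dead (PySem.List.pyRange 0 252 1) 0 (by omega)
        (by rw [sub_zero]; exact h2)]
      simp only [sub_zero, ← hvalid]
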